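-- pv_equiv track=rewrite | github.com/Gihoon-Kim-Git/PPDS24F-Daily-Code | week07/29/minmaxDivision.py | solution
-- ===== SOURCE A (Python) =====
-- def valid_devision(A, max_block_sum, K):
--     current_sum = 0
--     blocks = 1  # 최소
--
--     for num in A:
--         if current_sum + num > max_block_sum:     # [2,1,5,1], [2,2,2]
--             blocks += 1      # 새로운 블록 시작
--             current_sum = num     # 현재 블록을 num으로 시작
--             if blocks > K:
--                 return False
--         else:
--             current_sum += num
--
--     return True     # 아직 K 안 넘음 = 더 쪼갤 수 있음
--
-- def solution(K,M,A):
--     low = max(A)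
--     high = sum(A)
--
--     if K == 1:
--         return high
--     elif K >= len(A):   # [],[1],[2],...
--         return low
--     else:
--         while low <= high:
--             mid = (low+high) // 2      # max block sum
--             if valid_devision(A, mid, K):
--                 high = mid - 1   # 더 작은 값 가능한지 확인
--             else:
--                 low = mid + 1   # 블록 나눌 수 없음
--
--         return low   # 최소한의 최대 블록 합
-- ===== SOURCE B (Python) =====
-- def solution(K, M, A):
--     hi = sum(A)
--     lo = max(A)
--     if K == 1:
--         return hi
--     if K >= len(A):
--         return lo
--     kk = K if K > 1 else 1  # at least one block is always used
--
--     def blocks_needed(cap):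
--         # greedy: count the blocks a cap of `cap` forces, in one pass, no early exit
--         cnt, cur = 1, 0
--         for x in A:
--             if cur + x > cap:
--                 cnt += 1
--                 cur = x
--             else:
--                 cur += x
--         return cnt
--
--     def search(lo, hi):
--         if lo > hi:
--             return lo
--         mid = (lo + hi) // 2
--         if blocks_needed(mid) <= kk:
--             return search(lo, mid - 1)
--         return search(mid + 1, hi)
--
--     return search(lo, hi)
-- ===== Notes on version B (the rewrite author's own statement) =====
-- stated objective: alternative
-- what changed: A's early-exit boolean feasibility scan becomes a fold that counts the blocks a cap forces (compared against max(K,1)), and A's while-loop binary search becomes a recursive search function over the same interval.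
-- outside the precondition, e.g. on solution(2, 0, []): A raises ValueError, B raises ValueError
import Mathlib
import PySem

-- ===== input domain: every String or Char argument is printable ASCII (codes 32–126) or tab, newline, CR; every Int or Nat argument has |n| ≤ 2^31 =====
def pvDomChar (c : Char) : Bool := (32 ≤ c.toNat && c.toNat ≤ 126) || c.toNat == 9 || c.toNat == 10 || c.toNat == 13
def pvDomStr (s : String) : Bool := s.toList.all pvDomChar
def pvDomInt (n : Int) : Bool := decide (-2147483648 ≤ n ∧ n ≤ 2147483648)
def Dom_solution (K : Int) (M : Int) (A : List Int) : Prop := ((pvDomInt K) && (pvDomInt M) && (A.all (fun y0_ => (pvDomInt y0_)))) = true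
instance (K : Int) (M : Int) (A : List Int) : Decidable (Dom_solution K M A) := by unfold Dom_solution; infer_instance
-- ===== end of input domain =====

-- B replaces A's early-exit greedy feasibility test by a fold that counts the blocks a cap forces,
-- and A's while-loop binary search by a recursive search over the same interval (objective: alternative).

-- ===== PORT A =====
-- the for-loop of valid_devision, state (current_sum, blocks), with the early `return False`
def validDevGo (cap K : Int) : List Int → Int → Int → Bool
  | [], _, _ => true
  | num :: rest, cur, blocks =>
    if cur + num > cap then
      if blocks + 1 > K then false
      else validDevGo cap K rest num (blocks + 1)
    else validDevGo cap K rest (cur + num) blocks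

def valid_devision (A : List Int) (max_block_sum K : Int) : Bool :=
  validDevGo max_block_sum K A 0 1

-- the `while low <= high` loop
def solLoopA (A : List Int) (K low high : Int) : Int :=
  if _h : low ≤ high then
    let mid := PySem.Int.floordiv (low + high) 2
    if valid_devision A mid K then solLoopA A K low (mid - 1)
    else solLoopA A K (mid + 1) high
  else low
termination_by (high + 1 - low).toNat
decreasing_by
  · have := PySem.Int.floordiv_two_mid_bounds _h
    omega
  · have := PySem.Int.floordiv_two_mid_bounds _h
    omega

def solution (K : Int) (M : Int) (A : List Int) : Int :=
  match PySem.List.max? A (fun y => y) with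
  | none => 0      -- Python raises ValueError on max([]) — excluded by Pre_solution
  | some low =>
    let high := A.sum
    if K == 1 then high
    else if K ≥ (A.length : Int) then low
    else solLoopA A K low high

-- ===== PORT B =====
-- one fold over A counting the blocks forced by a cap (state: (cnt, cur))
def blocksNeeded (A : List Int) (cap : Int) : Int :=
  (A.foldl (fun s x => if s.2 + x > cap then (s.1 + 1, x) else (s.1, s.2 + x)) (1, 0)).1

-- the recursive `search`
def solSearch (A : List Int) (kk lo hi : Int) : Int :=
  if _h : lo > hi then lo
  else
    let mid := PySem.Int.floordiv (lo + hi) 2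
    if blocksNeeded A mid ≤ kk then solSearch A kk lo (mid - 1)
    else solSearch A kk (mid + 1) hi
termination_by (hi + 1 - lo).toNat
decreasing_by
  · have := PySem.Int.floordiv_two_mid_bounds (by omega : lo ≤ hi)
    omega
  · have := PySem.Int.floordiv_two_mid_bounds (by omega : lo ≤ hi)
    omega

def solution_alt (K : Int) (M : Int) (A : List Int) : Int :=
  match PySem.List.max? A (fun y => y) with
  | none => 0      -- Python raises ValueError on max([]) — excluded by Pre_solution
  | some lo =>
    let hi := A.sum
    if K == 1 then hi
    else if K ≥ (A.length : Int) then lo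
    else solSearch A (if K > 1 then K else 1) lo hi

-- ===== PRECONDITION & SPEC =====
-- Pre_ excludes the empty list, on which Python's max(A) raises ValueError in both A and B.
def Pre_solution (K : Int) (M : Int) (A : List Int) : Prop := A ≠ []
instance (K : Int) (M : Int) (A : List Int) : Decidable (Pre_solution K M A) := by unfold Pre_solution; infer_instance
def pvWitness_solution : Int × Int × List Int := (2, 0, [1, 2, 3])

def Spec_solution (K : Int) (M : Int) (A : List Int) (out : Int) : Prop := out = solution_alt K M A
instance (K : Int) (M : Int) (A : List Int) (out : Int) : Decidable (Spec_solution K M A out) := by unfold Spec_solution; infer_instance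

-- ===== CLAIM (what is proved, stated in full; the proofs are below) =====
def Claim_equal_solution : Prop := ∀ (K : Int) (M : Int) (A : List Int), Dom_solution K M A → Pre_solution K M A → Spec_solution K M A (solution K M A)

-- ===== LEMMAS AND PROOFS =====

-- the block counter of B's fold never drops below its start value
lemma blocksFold_fst_ge (cap : Int) (A : List Int) :
    ∀ cnt cur : Int,
      cnt ≤ (A.foldl (fun s x => if s.2 + x > cap then (s.1 + 1, x) else (s.1, s.2 + x)) (cnt, cur)).1 := by
  induction A with
  | nil => intro cnt cur; simp
  | cons x rest ih =>
    intro cnt cur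
    simp only [List.foldl_cons]
    by_cases h : cur + x > cap
    · simp only [h, if_pos]
      have := ih (cnt + 1) x
      omega
    · simp only [h, if_neg, not_false_iff]
      exact ih cnt (cur + x)

-- A's early-exit loop is true iff B's final block count stayed at its start or within K
lemma validDevGo_iff (cap K : Int) (A : List Int) :
    ∀ cur blocks : Int,
      (validDevGo cap K A cur blocks = true ↔
        ((A.foldl (fun s x => if s.2 + x > cap then (s.1 + 1, x) else (s.1, s.2 + x)) (blocks, cur)).1 = blocks ∨
         (A.foldl (fun s x => if s.2 + x > cap then (s.1 + 1, x) else (s.1, s.2 + x)) (blocks, cur)).1 ≤ K)) := by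
  induction A with
  | nil => intro cur blocks; simp [validDevGo]
  | cons x rest ih =>
    intro cur blocks
    simp only [validDevGo, List.foldl_cons]
    by_cases h : cur + x > cap
    · simp only [h, if_pos]
      have hge := blocksFold_fst_ge cap rest (blocks + 1) x
      by_cases hk : blocks + 1 > K
      · simp only [hk, if_pos]
        constructor
        · intro hfalse; cases hfalse
        · intro hor; rcases hor with h1 | h2 <;> omega
      · simp only [hk, if_neg, not_false_iff]
        rw [ih x (blocks + 1)]
        constructor
        · intro hor; rcases hor with h1 | h2
          · right; omega
          · right; exact h2
        · intro hor; rcases hor with h1 | h2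
          · omega
          · right; exact h2
    · simp only [h, if_neg, not_false_iff]
      exact ih (cur + x) blocks

-- A's feasibility test equals B's count-based test
lemma valid_eq_blocks (A : List Int) (cap K : Int) :
    valid_devision A cap K = decide (blocksNeeded A cap ≤ (if K > 1 then K else 1)) := by
  have h := validDevGo_iff cap K A 0 1
  have hge := blocksFold_fst_ge cap A 1 0
  unfold valid_devision blocksNeeded
  by_cases hv : validDevGo cap K A 0 1 = true
  · rw [hv]
    have := h.mp hv
    symm
    simp only [decide_eq_true_iff]
    split_ifs with hk <;> omega
  · simp only [Bool.not_eq_true] at hv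
    rw [hv]
    symm
    simp only [decide_eq_false_iff_not, not_le]
    by_contra hle
    rw [not_lt] at hle
    have : validDevGo cap K A 0 1 = true := by
      rw [h]
      split_ifs at hle with hk <;> omega
    rw [this] at hv; cases hv

-- the two searches coincide
lemma loop_eq (A : List Int) (K : Int) :
    ∀ n : Nat, ∀ low high : Int, (high + 1 - low).toNat ≤ n →
      solLoopA A K low high = solSearch A (if K > 1 then K else 1) low high := by
  intro n
  induction n with
  | zero =>
    intro low high hle
    rw [solLoopA, solSearch]
    have : ¬ low ≤ high := by omega
    simp [this, show low > high by omega]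
  | succ m ih =>
    intro low high hle
    rw [solLoopA, solSearch]
    by_cases h : low ≤ high
    · have hmid := PySem.Int.floordiv_two_mid_bounds h
      simp only [h, dif_pos, show ¬ low > high by omega, dif_neg, not_false_iff]
      rw [valid_eq_blocks]
      by_cases hc : blocksNeeded A (PySem.Int.floordiv (low + high) 2) ≤ (if K > 1 then K else 1)
      · simp only [hc, decide_true, if_pos]
        exact ih low (PySem.Int.floordiv (low + high) 2 - 1) (by omega)
      · simp only [hc, decide_false, if_neg, Bool.false_eq_true, not_false_iff]
        exact ih (PySem.Int.floordiv (low + high) 2 + 1) high (by omega)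
    · simp [h, show low > high by omega]

-- ===== VERDICT (by name: the statement is the Claim_ definition above) =====
theorem solution_spec : Claim_equal_solution := by
  intro K M A _hdom _hpre
  unfold Spec_solution solution solution_alt
  cases hmax : PySem.List.max? A (fun y => y) with
  | none => rfl
  | some low =>
    simp only
    by_cases hk1 : K == 1
    · simp [hk1]
    · simp only [hk1, if_neg, Bool.false_eq_true, not_false_iff]
      by_cases hklen : K ≥ (A.length : Int)
      · simp [hklen]
      · simp only [hklen, if_neg, not_false_iff]
        exact loop_eq A K _ low A.sum le_rfl
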